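-- pv_equiv track=rewrite | github.com/elhussein-salah/bioinformatics-algorithms | src/core/indexing.py | build_suffix_array_with_inverse
-- ===== SOURCE A (Python) =====
-- def build_suffix_array_with_inverse(text: str) -> tuple[list[int], list[int]]:
--     """
--     Build both suffix array and inverse suffix array simultaneously.
--
--     Args:
--         text: The text to build arrays for
--
--     Returns:
--         Tuple of (suffix_array, inverse_suffix_array)
--         - suffix_array: List of starting positions of sorted suffixes
--         - inverse_suffix_array: List mapping positions to ranks
--     """
--     if not text:
--         return [], []
--
--     # Generate all suffixes with their positions
--     suffixes = [(text[i:], i) for i in range(len(text))]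
--
--     # Sort suffixes alphabetically
--     sorted_suffixes = sorted(suffixes, key=lambda x: x[0])
--
--     # Build suffix array
--     suffix_array = [pos for _, pos in sorted_suffixes]
--
--     # Build inverse suffix array
--     n = len(text)
--     inverse_sa = [0] * n
--
--     for rank, position in enumerate(suffix_array):
--         inverse_sa[position] = rank
--
--     return suffix_array, inverse_sa
-- ===== SOURCE B (Python) =====
-- def build_suffix_array_with_inverse(text: str) -> tuple[list[int], list[int]]:
--     # Rank-by-counting: no sort. Every suffix's rank is the number of
--     # lexicographically smaller suffixes (suffixes are pairwise distinct),
--     # and the suffix array is obtained by inverting that rank permutation.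
--     n = len(text)
--     suffixes = [text[i:] for i in range(n)]
--     inverse_sa = [sum(1 for t in suffixes if t < s) for s in suffixes]
--     suffix_array = [0] * n
--     for i, r in enumerate(inverse_sa):
--         suffix_array[r] = i
--     return suffix_array, inverse_sa
-- ===== Notes on version B (the rewrite author's own statement) =====
-- stated objective: alternative
-- what changed: A sorts the (suffix, index) pairs and then scatters ranks; B never sorts: it computes each suffix's rank directly as the number of lexicographically smaller suffixes (suffixes are pairwise distinct, so this is exact) and obtains the suffix array by inverting that rank permutation.
import Mathlib
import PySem

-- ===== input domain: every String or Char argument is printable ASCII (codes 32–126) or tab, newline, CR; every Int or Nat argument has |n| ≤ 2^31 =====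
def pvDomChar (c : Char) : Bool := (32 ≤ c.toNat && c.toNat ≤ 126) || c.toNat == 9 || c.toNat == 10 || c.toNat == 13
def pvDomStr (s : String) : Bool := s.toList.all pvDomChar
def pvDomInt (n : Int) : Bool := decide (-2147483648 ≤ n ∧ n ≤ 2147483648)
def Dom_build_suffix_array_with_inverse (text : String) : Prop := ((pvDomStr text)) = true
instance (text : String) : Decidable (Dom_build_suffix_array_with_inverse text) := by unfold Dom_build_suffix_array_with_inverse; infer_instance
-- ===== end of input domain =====

-- B replaces A's sort-the-suffixes pass by a sortless rank-by-counting algorithm: each suffix's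
-- rank is the number of lexicographically smaller suffixes (suffixes are pairwise distinct), and
-- the suffix array is obtained by inverting the rank list; objective: alternative, no speed claim.

-- ===== PORT A =====
def build_suffix_array_with_inverse (text : String) : List Int × List Int :=
  let cs := text.toList
  -- if not text: return [], []
  if cs = [] then ([], [])
  else
    -- suffixes = [(text[i:], i) for i in range(len(text))]
    let suffixes : List (List Char × Int) :=
      (PySem.List.pyRange 0 (cs.length : Int) 1).map
        (fun i => (PySem.List.slice cs (some i) none, i))
    -- sorted_suffixes = sorted(suffixes, key=lambda x: x[0])
    let sorted_suffixes := PySem.List.sorted suffixes (fun x => x.1) false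
    -- suffix_array = [pos for _, pos in sorted_suffixes]
    let suffix_array : List Int := sorted_suffixes.map (fun x => x.2)
    -- inverse_sa = [0] * n; for rank, position in enumerate(suffix_array): inverse_sa[position] = rank
    let inverse_sa : List Int :=
      (PySem.List.enumerate suffix_array 0).foldl
        (fun inv rp => PySem.List.pySetD inv rp.2 rp.1)
        (List.replicate cs.length 0)
    (suffix_array, inverse_sa)

-- ===== PORT B =====
def build_suffix_array_with_inverse_alt (text : String) : List Int × List Int :=
  let cs := text.toList
  let n := cs.length
  -- suffixes = [text[i:] for i in range(n)]
  let suffixes : List (List Char) :=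
    (PySem.List.pyRange 0 (n : Int) 1).map (fun i => PySem.List.slice cs (some i) none)
  -- inverse_sa = [sum(1 for t in suffixes if t < s) for s in suffixes]
  let inverse_sa : List Int :=
    suffixes.map (fun s => (suffixes.map (fun t => if t < s then (1 : Int) else 0)).sum)
  -- suffix_array = [0] * n; for i, r in enumerate(inverse_sa): suffix_array[r] = i
  let suffix_array : List Int :=
    (PySem.List.enumerate inverse_sa 0).foldl
      (fun sa ir => PySem.List.pySetD sa ir.2 ir.1)
      (List.replicate n 0)
  (suffix_array, inverse_sa)

-- ===== PRECONDITION & SPEC =====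
def Spec_build_suffix_array_with_inverse (text : String) (out : List Int × List Int) : Prop := out = build_suffix_array_with_inverse_alt text
instance (text : String) (out : List Int × List Int) : Decidable (Spec_build_suffix_array_with_inverse text out) := by unfold Spec_build_suffix_array_with_inverse; infer_instance

-- ===== CLAIM (what is proved, stated in full; the proofs are below) =====
def Claim_equal_build_suffix_array_with_inverse : Prop := ∀ (text : String), Dom_build_suffix_array_with_inverse text → Spec_build_suffix_array_with_inverse text (build_suffix_array_with_inverse text)

-- ===== LEMMAS AND PROOFS =====

def pvL (cs : List Char) : List (List Char × Int) :=
  (List.range cs.length).map (fun k => (cs.drop k, (k : Int)))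
def pvKeys (cs : List Char) : List (List Char) :=
  (List.range cs.length).map (fun k => cs.drop k)
def pvInv (cs : List Char) : List Int :=
  (pvKeys cs).map (fun s => ((pvKeys cs).countP (fun t => decide (t < s)) : Int))

theorem pvA_suffixes (cs : List Char) :
    (PySem.List.pyRange 0 (cs.length : Int) 1).map
      (fun i => (PySem.List.slice cs (some i) none, i)) = pvL cs := by
  rw [PySem.List.pyRange_one]
  simp [pvL, List.map_map, Function.comp_def, PySem.List.slice_from_natCast]

theorem pvB_suffixes (cs : List Char) :
    (PySem.List.pyRange 0 (cs.length : Int) 1).map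
      (fun i => PySem.List.slice cs (some i) none) = pvKeys cs := by
  rw [PySem.List.pyRange_one]
  simp [pvKeys, List.map_map, Function.comp_def, PySem.List.slice_from_natCast]

theorem pvB_inv (cs : List Char) :
    (pvKeys cs).map (fun s => ((pvKeys cs).map (fun t => if t < s then (1 : Int) else 0)).sum)
      = pvInv cs := by
  unfold pvInv
  refine List.map_congr_left (fun s _ => ?_)
  have := PySem.List.sum_map_ite_one_zero (fun t => decide (t < s)) (pvKeys cs)
  simpa using this

theorem pvKeys_nodup (cs : List Char) : (pvKeys cs).Nodup := by
  refine List.Nodup.map_on ?_ (List.nodup_range)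
  intro x hx y hy h
  have := congrArg List.length h
  simp [List.length_drop] at this
  simp [List.mem_range] at hx hy
  omega
def pvS (cs : List Char) : List (List Char × Int) :=
  @PySem.List.sorted _ _ _ (@LinearOrder.toDecidableLT _ List.instLinearOrder) (pvL cs) (fun x => x.1) false

theorem pv_sorted_inst (cs : List Char) :
    PySem.List.sorted (pvL cs) (fun x => x.1) false = pvS cs := by
  unfold pvS; congr 1
def pvSA (cs : List Char) : List Int := (pvS cs).map (fun x => x.2)

theorem pvL_map_fst (cs : List Char) : (pvL cs).map (fun x => x.1) = pvKeys cs := by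
  simp [pvL, pvKeys, List.map_map, Function.comp_def]

theorem pvS_perm (cs : List Char) : (pvS cs).Perm (pvL cs) :=
  @PySem.List.sorted_perm _ _ _ (@LinearOrder.toDecidableLT _ List.instLinearOrder) (pvL cs) (fun x => x.1) false

theorem pvS_map_fst (cs : List Char) : ((pvS cs).map (fun x => x.1)).Perm (pvKeys cs) := by
  rw [← pvL_map_fst]
  exact List.Perm.map _ (pvS_perm cs)

theorem pvS_pairwise (cs : List Char) : (pvS cs).Pairwise (fun a b => a.1 < b.1) := by
  unfold pvS
  have hle := PySem.List.sorted_pairwise (pvL cs) (fun x => x.1)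
  have hnd : ((pvS cs).map (fun x => x.1)).Nodup :=
    ((pvS_map_fst cs).nodup_iff).2 (pvKeys_nodup cs)
  have hne : (pvS cs).Pairwise (fun a b => a.1 ≠ b.1) := List.pairwise_map.mp hnd
  refine List.Pairwise.imp ?_ (hle.and hne)
  intro a b h
  exact lt_of_le_of_ne h.1 h.2

theorem pvS_mem (cs : List Char) {p : List Char × Int} (hp : p ∈ pvS cs) :
    ∃ k : Nat, k < cs.length ∧ p = (cs.drop k, (k : Int)) := by
  have : p ∈ pvL cs := (pvS_perm cs).mem_iff.1 hp
  simp [pvL] at this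
  obtain ⟨k, hk, h⟩ := this
  exact ⟨k, hk, h.symm⟩

theorem pvSA_perm (cs : List Char) :
    (pvSA cs).Perm ((List.range cs.length).map (fun k : Nat => (k : Int))) := by
  have h := List.Perm.map (fun x => x.2) (pvS_perm cs)
  have h2 : (pvL cs).map (fun x => x.2) = (List.range cs.length).map (fun k : Nat => (k : Int)) := by
    unfold pvL; rw [List.map_map]; rfl
  rw [pvSA, ← h2]
  exact h
theorem pv_countP_pivot {α κ : Type} [LinearOrder κ] (key : α → κ) (u w : List α) (b : α)
    (h : (u ++ b :: w).Pairwise (fun a c => key a < key c)) :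
    (u ++ b :: w).countP (fun p => decide (key p < key b)) = u.length := by
  rcases List.pairwise_append.1 h with ⟨hu, hbw, hcross⟩
  rw [List.countP_append, List.countP_cons]
  have h1 : u.countP (fun p => decide (key p < key b)) = u.length := by
    rw [List.countP_eq_length]
    intro a ha
    simpa using hcross a ha b (List.mem_cons_self)
  have h2 : w.countP (fun p => decide (key p < key b)) = 0 := by
    rw [List.countP_eq_zero]
    intro a ha
    simpa using not_lt_of_gt ((List.pairwise_cons.1 hbw).1 a ha)
  rw [h1, h2, if_neg (by simp)]
  omega

theorem pv_countP_lt {α κ : Type} [LinearOrder κ] (key : α → κ) (S : List α)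
    (h : S.Pairwise (fun a b => key a < key b)) (r : Nat) (hr : r < S.length) :
    S.countP (fun p => decide (key p < key S[r])) = r := by
  have hdec : S = S.take r ++ S[r] :: S.drop (r + 1) := by
    rw [← List.drop_eq_getElem_cons hr, List.take_append_drop]
  calc S.countP (fun p => decide (key p < key S[r]))
      = (S.take r ++ S[r] :: S.drop (r + 1)).countP (fun p => decide (key p < key S[r])) := by
        rw [← hdec]
    _ = (S.take r).length := pv_countP_pivot key _ _ _ (hdec ▸ h)
    _ = r := by simp [List.length_take]; omega
theorem pv_scatter_length (ps : List (Int × Int)) (init : List Int) :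
    (ps.foldl (fun acc p => PySem.List.pySetD acc p.2 p.1) init).length = init.length := by
  induction ps generalizing init with
  | nil => rfl
  | cons p ps ih => rw [List.foldl_cons, ih, PySem.List.length_pySetD]

theorem pv_scatter_untouched (ps : List (Int × Int)) (init : List Int) (j : Nat)
    (hpos : ∀ p ∈ ps, 0 ≤ p.2) (hj : ((j : Int)) ∉ ps.map (fun p => p.2)) :
    (ps.foldl (fun acc p => PySem.List.pySetD acc p.2 p.1) init)[j]? = init[j]? := by
  induction ps generalizing init with
  | nil => rfl
  | cons p ps ih =>
    rw [List.foldl_cons]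
    have hp2 : p.2 = ((p.2.toNat : Nat) : Int) := (Int.toNat_of_nonneg (hpos p List.mem_cons_self)).symm
    have hne : p.2.toNat ≠ j := by
      intro hh
      exact hj (by simp only [List.map_cons, List.mem_cons]; left; omega)
    have hj' : ((j : Int)) ∉ ps.map (fun p => p.2) := by
      intro hh
      exact hj (by rw [List.map_cons]; exact List.mem_cons_of_mem _ hh)
    rw [ih _ (fun q hq => hpos q (List.mem_cons_of_mem _ hq)) hj']
    rw [hp2, PySem.List.pySetD_natCast]
    exact List.getElem?_set_ne hne

theorem pv_scatter_hit (ps : List (Int × Int)) (init : List Int) (v : Int) (j : Nat)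
    (hin : ∀ p ∈ ps, 0 ≤ p.2 ∧ p.2 < (init.length : Int))
    (hnd : (ps.map (fun p => p.2)).Nodup)
    (hmem : ((v, (j : Int)) ∈ ps)) :
    (ps.foldl (fun acc p => PySem.List.pySetD acc p.2 p.1) init)[j]? = some v := by
  induction ps generalizing init with
  | nil => simp at hmem
  | cons p ps ih =>
    rw [List.foldl_cons]
    rcases List.mem_cons.1 hmem with hp | hp
    · subst hp
      have hnotin : ((j : Int)) ∉ ps.map (fun p => p.2) := by
        simpa using (List.nodup_cons.1 hnd).1
      rw [pv_scatter_untouched ps _ j (fun q hq => (hin q (List.mem_cons_of_mem _ hq)).1) hnotin]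
      have hjlen : j < init.length := by
        have := (hin _ List.mem_cons_self).2
        simp only at this
        exact_mod_cast this
      simp [PySem.List.pySetD_natCast, hjlen]
    · refine ih _ ?_ ((List.nodup_cons.1 (by simpa using hnd)).2) hp
      intro q hq
      have := hin q (List.mem_cons_of_mem _ hq)
      rwa [PySem.List.length_pySetD]
theorem pvInv_length (cs : List Char) : (pvInv cs).length = cs.length := by
  simp [pvInv, pvKeys]

theorem pvS_length (cs : List Char) : (pvS cs).length = cs.length := by
  simpa [pvL] using (pvS_perm cs).length_eq

theorem pvSA_length (cs : List Char) : (pvSA cs).length = cs.length := by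
  simp [pvSA, pvS_length]

theorem pvSA_nodup (cs : List Char) : (pvSA cs).Nodup := by
  refine ((pvSA_perm cs).nodup_iff).2 ?_
  exact List.Nodup.map (fun a b => by omega) List.nodup_range

theorem pvSA_mem_range (cs : List Char) {x : Int} (hx : x ∈ pvSA cs) :
    0 ≤ x ∧ x < (cs.length : Int) := by
  have := ((pvSA_perm cs).mem_iff).1 hx
  simp only [List.mem_map, List.mem_range] at this
  obtain ⟨k, hk, rfl⟩ := this
  constructor <;> omega

-- the suffix at position r of the sorted list starts at index (pvS cs)[r].2
theorem pvS_get_shape (cs : List Char) (r : Nat) (hr : r < (pvS cs).length) :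
    ∃ k : Nat, k < cs.length ∧ (pvS cs)[r] = (cs.drop k, (k : Int)) :=
  pvS_mem cs (List.getElem_mem hr)

theorem pv_inv_at (cs : List Char) (r : Nat) (hr : r < (pvS cs).length) :
    (pvInv cs)[((pvS cs)[r].2).toNat]? = some (r : Int) := by
  obtain ⟨k, hk, hek⟩ := pvS_get_shape cs r hr
  have hsnd : ((pvS cs)[r].2).toNat = k := by rw [hek]; simp
  have hfst : (pvS cs)[r].1 = cs.drop k := by rw [hek]
  rw [hsnd]
  -- pvInv[k]? = some (countP (· < cs.drop k) Ks)
  have hKs : (pvKeys cs)[k]? = some (cs.drop k) := by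
    simp [pvKeys, hk]
  have h1 : (pvInv cs)[k]? =
      some (((pvKeys cs).countP (fun t => decide (t < cs.drop k)) : Int)) := by
    simp only [pvInv, List.getElem?_map, hKs, Option.map_some]
  rw [h1]
  have h2 : (pvKeys cs).countP (fun t => decide (t < cs.drop k))
      = ((pvS cs).map (fun x => x.1)).countP (fun t => decide (t < cs.drop k)) :=
    (List.Perm.countP_eq _ (pvS_map_fst cs)).symm
  have hlt := pv_countP_lt (fun x : List Char × Int => x.1) (pvS cs) (pvS_pairwise cs) r hr
  have hfin : (pvS cs).countP ((fun t => decide (t < cs.drop k)) ∘ (fun x => x.1)) = r := by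
    refine Eq.trans (List.countP_congr ?_) hlt
    intro p _
    simp only [Function.comp_apply]
    rw [← hfst]
    simp
  rw [h2, List.countP_map, hfin]
theorem pv_index_of (cs : List Char) (j : Nat) (hj : j < cs.length) :
    ∃ r : Nat, r < (pvS cs).length ∧ (pvSA cs)[r]? = some ((j : Int))
      ∧ (pvInv cs)[j]? = some ((r : Int)) := by
  have hmem : ((j : Int)) ∈ pvSA cs := by
    refine ((pvSA_perm cs).mem_iff).2 ?_
    simp only [List.mem_map, List.mem_range]
    exact ⟨j, hj, rfl⟩
  obtain ⟨r, hr, hget⟩ := List.mem_iff_getElem.1 hmem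
  have hrS : r < (pvS cs).length := by
    have := pvSA_length cs; have := pvS_length cs; omega
  have hsnd : (pvS cs)[r].2 = ((j : Int)) := by
    have h2 : (pvSA cs)[r] = (pvS cs)[r].2 := by
      simp only [pvSA]
      exact List.getElem_map _
    rw [← h2]
    exact hget
  have hinv := pv_inv_at cs r hrS
  have htn : ((pvS cs)[r].2).toNat = j := by rw [hsnd]; simp
  refine ⟨r, hrS, ?_, ?_⟩
  · rw [List.getElem?_eq_getElem hr, hget]
  · rw [← htn]; exact hinv

theorem pv_enum_snd_nodup {xs : List Int} (h : xs.Nodup) :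
    ((PySem.List.enumerate xs 0).map (fun p => p.2)).Nodup := by
  rw [PySem.List.map_snd_enumerate]
  exact h

theorem pv_enum_in_range {xs : List Int} {n : Nat}
    (h : ∀ x ∈ xs, 0 ≤ x ∧ x < (n : Int)) :
    ∀ p ∈ PySem.List.enumerate xs 0, 0 ≤ p.2 ∧ p.2 < ((List.replicate n (0:Int)).length : Int) := by
  intro p hp
  obtain ⟨k, hk, rfl⟩ := (PySem.List.mem_enumerate_iff xs 0 p).1 hp
  simpa using h _ (List.getElem_mem hk)

theorem invA_eq (cs : List Char) :
    (PySem.List.enumerate (pvSA cs) 0).foldl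
      (fun acc p => PySem.List.pySetD acc p.2 p.1) (List.replicate cs.length 0) = pvInv cs := by
  have hlen : ((PySem.List.enumerate (pvSA cs) 0).foldl
      (fun acc p => PySem.List.pySetD acc p.2 p.1) (List.replicate cs.length 0)).length
      = cs.length := by
    rw [pv_scatter_length]; simp
  apply List.ext_getElem?
  intro j
  by_cases hj : j < cs.length
  · obtain ⟨r, hrS, hsa, hinv⟩ := pv_index_of cs j hj
    rw [hinv]
    have hmem : (((r : Int)), ((j : Int))) ∈ PySem.List.enumerate (pvSA cs) 0 := by
      rw [PySem.List.mem_enumerate_iff]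
      refine ⟨r, by rw [pvSA_length]; have := pvS_length cs; omega, ?_⟩
      have : (pvSA cs)[r]'(by rw [pvSA_length]; have := pvS_length cs; omega) = ((j : Int)) := by
        have := hsa; rwa [List.getElem?_eq_getElem (by rw [pvSA_length]; have := pvS_length cs; omega), Option.some_inj] at this
      rw [this]; simp
    exact pv_scatter_hit _ _ _ _
      (pv_enum_in_range (fun x hx => pvSA_mem_range cs hx))
      (pv_enum_snd_nodup (pvSA_nodup cs)) hmem
  · rw [List.getElem?_eq_none (by rw [hlen]; omega), List.getElem?_eq_none (by rw [pvInv_length]; omega)]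

theorem pvInv_bounds (cs : List Char) :
    ∀ x ∈ pvInv cs, 0 ≤ x ∧ x < (cs.length : Int) := by
  intro x hx
  obtain ⟨i, hi, rfl⟩ := List.mem_iff_getElem.1 hx
  have hin : i < cs.length := by have := pvInv_length cs; omega
  obtain ⟨r, hrS, _, hinv⟩ := pv_index_of cs i hin
  have : (pvInv cs)[i] = ((r : Int)) := by
    rwa [List.getElem?_eq_getElem hi, Option.some_inj] at hinv
  rw [this]
  have := pvS_length cs
  constructor <;> [omega; exact_mod_cast (by omega : r < cs.length)]

theorem pvInv_nodup (cs : List Char) : (pvInv cs).Nodup := by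
  rw [List.nodup_iff_injective_get]
  intro a b hab
  obtain ⟨ra, hraS, hsaa, hinva⟩ := pv_index_of cs a.1 (by have := pvInv_length cs; omega)
  obtain ⟨rb, hrbS, hsab, hinvb⟩ := pv_index_of cs b.1 (by have := pvInv_length cs; omega)
  have ha : (pvInv cs).get a = ((ra : Int)) := by
    rw [List.get_eq_getElem]
    rwa [List.getElem?_eq_getElem a.2, Option.some_inj] at hinva
  have hb : (pvInv cs).get b = ((rb : Int)) := by
    rw [List.get_eq_getElem]
    rwa [List.getElem?_eq_getElem b.2, Option.some_inj] at hinvb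
  have hrr : ra = rb := by rw [ha, hb] at hab; exact_mod_cast hab
  rw [hrr] at hsaa
  rw [hsaa] at hsab
  have : ((a.1 : Int)) = ((b.1 : Int)) := by exact_mod_cast Option.some_inj.1 hsab
  exact Fin.ext (by exact_mod_cast this)

theorem saB_eq (cs : List Char) :
    (PySem.List.enumerate (pvInv cs) 0).foldl
      (fun acc p => PySem.List.pySetD acc p.2 p.1) (List.replicate cs.length 0) = pvSA cs := by
  have hlen : ((PySem.List.enumerate (pvInv cs) 0).foldl
      (fun acc p => PySem.List.pySetD acc p.2 p.1) (List.replicate cs.length 0)).length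
      = cs.length := by
    rw [pv_scatter_length]; simp
  apply List.ext_getElem?
  intro r
  by_cases hr : r < cs.length
  · have hrS : r < (pvS cs).length := by have := pvS_length cs; omega
    obtain ⟨k, hk, hek⟩ := pvS_get_shape cs r hrS
    have hrA : r < (pvSA cs).length := by rw [pvSA_length]; omega
    have hsa_get : (pvSA cs)[r]'hrA = ((k : Int)) := by
      have h2 : (pvSA cs)[r]'hrA = (pvS cs)[r].2 := by
        simp only [pvSA]
        exact List.getElem_map _
      rw [h2, hek]
    have hinv := pv_inv_at cs r hrS
    have htn : ((pvS cs)[r].2).toNat = k := by rw [hek]; simp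
    rw [htn] at hinv
    have hkI : k < (pvInv cs).length := by rw [pvInv_length]; omega
    have hinv_get : (pvInv cs)[k]'hkI = ((r : Int)) := by
      rwa [List.getElem?_eq_getElem hkI, Option.some_inj] at hinv
    have hmem : (((k : Int)), ((r : Int))) ∈ PySem.List.enumerate (pvInv cs) 0 := by
      rw [PySem.List.mem_enumerate_iff]
      exact ⟨k, hkI, by rw [hinv_get]; simp⟩
    rw [pv_scatter_hit _ _ _ _
      (pv_enum_in_range (pvInv_bounds cs))
      (pv_enum_snd_nodup (pvInv_nodup cs)) hmem]
    rw [List.getElem?_eq_getElem hrA, hsa_get]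
  · rw [List.getElem?_eq_none (by rw [hlen]; omega),
      List.getElem?_eq_none (by rw [pvSA_length]; have := pvS_length cs; omega)]

theorem main_eq (text : String) :
    build_suffix_array_with_inverse text = build_suffix_array_with_inverse_alt text := by
  unfold build_suffix_array_with_inverse build_suffix_array_with_inverse_alt
  simp only [pvA_suffixes, pvB_suffixes, pvB_inv, pv_sorted_inst]
  by_cases h : text.toList = []
  · rw [if_pos h]
    rw [show pvInv text.toList = [] from by simp [pvInv, pvKeys, h]]
    simp [h]
  · rw [if_neg h]
    rw [show (pvS text.toList).map (fun x => x.2) = pvSA text.toList from rfl]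
    rw [invA_eq, saB_eq]

-- ===== VERDICT (by name: the statement is the Claim_ definition above) =====
theorem build_suffix_array_with_inverse_spec : Claim_equal_build_suffix_array_with_inverse := by
  intro text _
  exact main_eq text
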